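-- pv_equiv track=rewrite | github.com/reisenx/2110101-COM-PROG | G66 Grader 2566/2566_2_Quiz_2_1.py | less_offensive
-- ===== SOURCE A (Python) =====
-- def hide_vowel(w):
--     h = ""
--     for c in w:
--         if c.lower() in 'aeiou':
--             c = '*'
--         h += c
--     return h
--
-- def less_offensive(t,oword):
--     index = 0
--     end = len(oword)
--     censor = ""
--     while(index<len(t)):
--         if(t[index:end].lower() == oword.lower()):
--             censor += hide_vowel(t[index:end])
--             index += len(oword)
--             end += len(oword)
--         else:
--             censor += t[index]
--             index += 1
--             end +=1
--     return censor
-- ===== SOURCE B (Python) =====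
-- def less_offensive(t, oword):
--     # Uses C-level str.find on pre-lowered copies and builds the result in chunks.
--     tl = t.lower()
--     wl = oword.lower()
--     m = len(oword)
--     parts = []
--     i = 0
--     while True:
--         j = tl.find(wl, i)
--         if j == -1:
--             parts.append(t[i:])
--             break
--         parts.append(t[i:j])
--         parts.append(''.join('*' if c in 'aeiouAEIOU' else c for c in t[j:j+m]))
--         i = j + m
--     return ''.join(parts)
-- ===== Notes on version B (the rewrite author's own statement) =====
-- stated objective: faster
-- what changed: Replaced the per-position slice/lower/compare scan with one pre-lowering of both strings followed by C-level str.find jumps between matches, building the output as joined chunks; Pre_ excludes oword == '', on which both A and B loop forever for non-empty t (A returns '' only in the degenerate case t == '').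
-- outside the precondition, e.g. on less_offensive('', ''): A returns '', B does not finish within the time limit
import Mathlib
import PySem

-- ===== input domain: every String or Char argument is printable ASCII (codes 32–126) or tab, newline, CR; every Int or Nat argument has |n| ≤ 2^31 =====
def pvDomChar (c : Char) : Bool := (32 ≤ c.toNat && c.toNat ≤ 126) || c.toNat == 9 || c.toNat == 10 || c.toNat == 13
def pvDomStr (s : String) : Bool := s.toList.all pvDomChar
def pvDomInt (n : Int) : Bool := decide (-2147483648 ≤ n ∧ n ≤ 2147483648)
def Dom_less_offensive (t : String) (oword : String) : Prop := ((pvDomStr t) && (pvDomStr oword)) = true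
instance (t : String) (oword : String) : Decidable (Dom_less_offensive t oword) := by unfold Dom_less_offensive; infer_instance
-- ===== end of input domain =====

-- B replaces A's per-position slice/lower/compare scan by pre-lowering both strings once and
-- jumping between occurrences with str.find, building the output in chunks (objective: faster).

-- ===== PORT A =====
def hideVowel (w : List Char) : List Char :=
  w.foldl (fun h c => h ++ [if PySem.Chars.isIn [PySem.Chars.lowerChar c] "aeiou".toList then '*' else c]) []

-- fuel = t.length + 1 bounds the iteration count: each step advances index by ≥ 1 (oword ≠ "").
def lessOffLoopA (t ow : List Char) : Nat → Nat → Nat → List Char → List Char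
  | 0, _, _, censor => censor
  | fuel+1, index, e, censor =>
    if index < t.length then
      if PySem.Chars.lower (PySem.Chars.slice t (some (index:Int)) (some (e:Int)))
          = PySem.Chars.lower ow then
        lessOffLoopA t ow fuel (index + ow.length) (e + ow.length)
          (censor ++ hideVowel (PySem.Chars.slice t (some (index:Int)) (some (e:Int))))
      else
        lessOffLoopA t ow fuel (index + 1) (e + 1)
          (censor ++ ((PySem.List.pyGet? t (index:Int)).elim [] (fun c => [c])))
    else censor

def less_offensive (t : String) (oword : String) : String :=
  String.mk (lessOffLoopA t.toList oword.toList (t.toList.length + 1) 0 oword.toList.length [])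

-- ===== PORT B =====
def censorChunk (w : List Char) : List Char :=
  w.map (fun c => if c ∈ "aeiouAEIOU".toList then '*' else c)

-- fuel = t.length + 1 bounds the iteration count: each found match advances i by ≥ 1 (oword ≠ "").
def lessOffLoopB (t tl wl : List Char) (m : Nat) : Nat → Nat → List Char
  | 0, i => t.drop i
  | fuel+1, i =>
    let j := PySem.Chars.findFrom tl wl (i:Int)
    if j = -1 then t.drop i
    else ((t.drop i).take (j.toNat - i)) ++ censorChunk ((t.drop j.toNat).take m)
         ++ lessOffLoopB t tl wl m fuel (j.toNat + m)

def less_offensive_alt (t : String) (oword : String) : String :=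
  String.mk (lessOffLoopB t.toList (PySem.Chars.lower t.toList) (PySem.Chars.lower oword.toList)
    oword.toList.length (t.toList.length + 1) 0)

-- ===== PRECONDITION & SPEC =====
-- Pre_ excludes only oword = "", on which A's while-loop never advances: the Python A (and B) loops
-- forever for every non-empty t, and returns "" only in the degenerate case t = "" (cited in claim.json).
def Pre_less_offensive (t : String) (oword : String) : Prop := oword ≠ ""
instance (t : String) (oword : String) : Decidable (Pre_less_offensive t oword) := by unfold Pre_less_offensive; infer_instance
def pvWitness_less_offensive : String × String := ("Hello World, hello", "hello")

def Spec_less_offensive (t : String) (oword : String) (out : String) : Prop := out = less_offensive_alt t oword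
instance (t : String) (oword : String) (out : String) : Decidable (Spec_less_offensive t oword out) := by unfold Spec_less_offensive; infer_instance

-- ===== CLAIM (what is proved, stated in full; the proofs are below) =====
def Claim_equal_less_offensive : Prop := ∀ (t : String) (oword : String), Dom_less_offensive t oword → Pre_less_offensive t oword → Spec_less_offensive t oword (less_offensive t oword)

-- ===== LEMMAS AND PROOFS =====

theorem le_char_iff {a b : Char} : a ≤ b ↔ a.toNat ≤ b.toNat := by
  rw [Char.le_def, UInt32.le_iff_toNat_le]; rfl

theorem char_eq_of_toNat {a b : Char} (h : a.toNat = b.toNat) : a = b := by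
  apply Char.ext; exact UInt32.toNat_inj.mp h

theorem vowel_iff (c : Char) : (PySem.Chars.lowerChar c ∈ "aeiou".toList) ↔ c ∈ "aeiouAEIOU".toList := by
  have hs5 : "aeiou".toList = ['a','e','i','o','u'] := by decide
  have hs10 : "aeiouAEIOU".toList = ['a','e','i','o','u','A','E','I','O','U'] := by decide
  rw [hs5, hs10]
  simp only [PySem.Chars.lowerChar, PySem.Chars.isupper, Bool.and_eq_true, decide_eq_true_eq,
    List.mem_cons, List.not_mem_nil, or_false]
  split_ifs with hin
  · have h1 : 65 ≤ c.toNat := le_char_iff.mp hin.1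
    have h2 : c.toNat ≤ 90 := le_char_iff.mp hin.2
    have hv : (Char.ofNat (c.toNat + 32)).toNat = c.toNat + 32 := by
      rw [Char.toNat_ofNat, if_pos (Or.inl (by omega))]
    constructor
    · rintro (h' | h' | h' | h' | h') <;> (have hn := congrArg Char.toNat h'; rw [hv] at hn)
      · have he : c = 'A' := char_eq_of_toNat (by rw [show ('a':Char).toNat = 97 from rfl] at hn; rw [show ('A':Char).toNat = 65 from rfl]; omega)
        subst he; decide
      · have he : c = 'E' := char_eq_of_toNat (by rw [show ('e':Char).toNat = 101 from rfl] at hn; rw [show ('E':Char).toNat = 69 from rfl]; omega)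
        subst he; decide
      · have he : c = 'I' := char_eq_of_toNat (by rw [show ('i':Char).toNat = 105 from rfl] at hn; rw [show ('I':Char).toNat = 73 from rfl]; omega)
        subst he; decide
      · have he : c = 'O' := char_eq_of_toNat (by rw [show ('o':Char).toNat = 111 from rfl] at hn; rw [show ('O':Char).toNat = 79 from rfl]; omega)
        subst he; decide
      · have he : c = 'U' := char_eq_of_toNat (by rw [show ('u':Char).toNat = 117 from rfl] at hn; rw [show ('U':Char).toNat = 85 from rfl]; omega)
        subst he; decide
    · rintro (rfl | rfl | rfl | rfl | rfl | rfl | rfl | rfl | rfl | rfl)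
      · exact absurd (le_char_iff.mp hin.2) (by decide)
      · exact absurd (le_char_iff.mp hin.2) (by decide)
      · exact absurd (le_char_iff.mp hin.2) (by decide)
      · exact absurd (le_char_iff.mp hin.2) (by decide)
      · exact absurd (le_char_iff.mp hin.2) (by decide)
      · decide
      · decide
      · decide
      · decide
      · decide
  · constructor
    · tauto
    · rintro (rfl | rfl | rfl | rfl | rfl | rfl | rfl | rfl | rfl | rfl)
      · tauto
      · tauto
      · tauto
      · tauto
      · tauto
      · exact absurd ⟨by decide, by decide⟩ hin
      · exact absurd ⟨by decide, by decide⟩ hin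
      · exact absurd ⟨by decide, by decide⟩ hin
      · exact absurd ⟨by decide, by decide⟩ hin
      · exact absurd ⟨by decide, by decide⟩ hin

theorem singleton_infix {α : Type} (a : α) (l : List α) : [a] <:+: l ↔ a ∈ l := by
  constructor
  · rintro ⟨s, t, rfl⟩; simp
  · intro h; obtain ⟨s, t, rfl⟩ := List.append_of_mem h; exact ⟨s, t, by simp⟩

theorem foldl_push {α β : Type} (g : α → β) :
    ∀ (w : List α) (acc : List β), w.foldl (fun h c => h ++ [g c]) acc = acc ++ w.map g := by
  intro w
  induction w with
  | nil => intro acc; simp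
  | cons c w ih => intro acc; simp [List.foldl_cons, ih]

theorem hideVowel_eq (w : List Char) : hideVowel w = censorChunk w := by
  unfold hideVowel censorChunk
  rw [foldl_push, List.nil_append]
  apply List.map_congr_left
  intro c _
  have hb : (PySem.Chars.isIn [PySem.Chars.lowerChar c] "aeiou".toList = true) ↔ c ∈ "aeiouAEIOU".toList :=
    (PySem.Chars.isIn_iff_infix _ _).trans ((singleton_infix _ _).trans (vowel_iff c))
  by_cases h : c ∈ "aeiouAEIOU".toList
  · rw [if_pos (hb.mpr h), if_pos h]
  · rw [if_neg (fun hh => h (hb.mp hh)), if_neg h]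

-- A's slice t[index:end] with end = index + m, as take/drop
theorem sliceA_eq (t : List Char) (i m : Nat) :
    PySem.Chars.slice t (some (i:Int)) (some ((i+m:Nat):Int)) = (t.drop i).take m := by
  rw [PySem.Chars.slice_eq_listSlice, PySem.List.slice_natCast t i (i+m), Nat.add_sub_cancel_left]

theorem lower_take_drop (t : List Char) (i m : Nat) :
    PySem.Chars.lower ((t.drop i).take m) = ((PySem.Chars.lower t).drop i).take m := by
  simp [PySem.Chars.lower]

theorem length_lower (t : List Char) : (PySem.Chars.lower t).length = t.length := by
  simp [PySem.Chars.lower]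

-- A's match condition at index i is: (lowered oword) is a prefix of (lowered t).drop i
theorem condA_iff (t ow : List Char) (i : Nat) :
    (PySem.Chars.lower (PySem.Chars.slice t (some (i:Int)) (some ((i + ow.length:Nat):Int)))
      = PySem.Chars.lower ow)
    ↔ PySem.Chars.lower ow <+: (PySem.Chars.lower t).drop i := by
  rw [sliceA_eq, lower_take_drop, eq_comm, List.prefix_iff_eq_take, length_lower]

-- a prefix occurrence at or beyond k is an infix of the drop at k
theorem infix_drop_of_prefix_drop (wl tl : List Char) (k j : Nat) (hkj : k ≤ j)
    (h : wl <+: tl.drop j) : wl <:+: tl.drop k := by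
  have hd : tl.drop j = (tl.drop k).drop (j - k) := by rw [List.drop_drop]; congr 1; omega
  rw [hd] at h
  exact h.isInfix.trans (List.drop_suffix _ _).isInfix

theorem prefix_drop_bound (wl tl : List Char) (j : Nat) (h : wl <+: tl.drop j) :
    j + wl.length ≤ tl.length ∨ tl.length < j := by
  have := h.length_le
  simp only [List.length_drop] at this
  omega

-- at i = t.length the B loop returns [] whatever the fuel
theorem loopB_at_end (t tl wl : List Char) (m f : Nat)
    (hwl : wl ≠ []) (htl : tl.length = t.length) :
    lessOffLoopB t tl wl m f t.length = [] := by
  cases f with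
  | zero => simp [lessOffLoopB, List.drop_length]
  | succ f =>
    have hj : PySem.Chars.findFrom tl wl (t.length : Int) = -1 := by
      rw [PySem.Chars.findFrom_natCast_eq_neg_one_iff tl wl t.length (le_of_eq htl.symm)]
      rw [← htl, List.drop_length]
      simpa using hwl
    simp [lessOffLoopB, hj, List.drop_length]

-- fuel irrelevance for the B loop
theorem loopB_fuel (t tl wl : List Char) (m : Nat) (hm : wl.length = m) (hm1 : 1 ≤ m)
    (htl : tl.length = t.length) :
    ∀ f1 f2 i, i ≤ t.length → t.length - i ≤ f1 → t.length - i ≤ f2 →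
      lessOffLoopB t tl wl m f1 i = lessOffLoopB t tl wl m f2 i := by
  have hwl : wl ≠ [] := by intro h; rw [h] at hm; simp at hm; omega
  intro f1
  induction f1 with
  | zero =>
    intro f2 i hi h1 h2
    have : i = t.length := by omega
    subst this
    rw [loopB_at_end t tl wl m f2 hwl htl]
    simp [lessOffLoopB, List.drop_length]
  | succ f ih =>
    intro f2 i hi h1 h2
    by_cases hin : i = t.length
    · subst hin
      rw [loopB_at_end t tl wl m _ hwl htl, loopB_at_end t tl wl m _ hwl htl]
    · have hlt : i < t.length := lt_of_le_of_ne hi hin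
      obtain ⟨f2', rfl⟩ : ∃ f2', f2 = f2' + 1 := ⟨f2 - 1, by omega⟩
      by_cases hj : PySem.Chars.findFrom tl wl (i:Int) = -1
      · simp only [lessOffLoopB, hj, if_pos]
      · have hik : i ≤ tl.length := by omega
        obtain ⟨hji, hpre, hmin⟩ := PySem.Chars.findFrom_natCast_spec tl wl i hik hj
        set jn := (PySem.Chars.findFrom tl wl (i:Int)).toNat with hjn
        have hjge : i ≤ jn := by
          have := Int.toNat_le_toNat hji
          simpa using this
        have hbd : jn + m ≤ t.length := by
          rcases prefix_drop_bound wl tl jn hpre with h | h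
          · omega
          · exfalso
            have := hpre.length_le
            simp only [List.length_drop] at this
            omega
        simp only [lessOffLoopB, hj, if_false]
        congr 1
        exact ih f2' (jn + m) (by omega) (by omega) (by omega)

theorem loopB_succ (t tl wl : List Char) (m f i : Nat) :
    lessOffLoopB t tl wl m (f+1) i =
      (if PySem.Chars.findFrom tl wl (i:Int) = -1 then t.drop i
       else ((t.drop i).take ((PySem.Chars.findFrom tl wl (i:Int)).toNat - i))
            ++ censorChunk ((t.drop (PySem.Chars.findFrom tl wl (i:Int)).toNat).take m)
            ++ lessOffLoopB t tl wl m f ((PySem.Chars.findFrom tl wl (i:Int)).toNat + m)) := rfl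

-- one B step over a non-matching position
theorem loopB_step (t tl wl : List Char) (m f : Nat) (hm : wl.length = m) (hm1 : 1 ≤ m)
    (htl : tl.length = t.length) (i : Nat) (hi : i < t.length)
    (hnm : ¬ wl <+: tl.drop i) (hf : t.length - i ≤ f + 1) :
    lessOffLoopB t tl wl m (f+1) i = t[i] :: lessOffLoopB t tl wl m f (i+1) := by
  have hwl : wl ≠ [] := by intro h; rw [h] at hm; simp at hm; omega
  have hik : i ≤ tl.length := by omega
  by_cases hj : PySem.Chars.findFrom tl wl (i:Int) = -1
  · -- no occurrence at all from i: none from i+1 either, both sides are drops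
    have hnone : ¬ wl <:+: tl.drop i :=
      (PySem.Chars.findFrom_natCast_eq_neg_one_iff tl wl i hik).mp hj
    have hj1 : PySem.Chars.findFrom tl wl ((i+1 : Nat) : Int) = -1 := by
      rw [PySem.Chars.findFrom_natCast_eq_neg_one_iff tl wl (i+1) (by omega)]
      intro hcon
      exact hnone (hcon.trans (by
        have hd : tl.drop (i+1) = (tl.drop i).drop 1 := by rw [List.drop_drop]
        rw [hd]
        exact (List.drop_suffix _ _).isInfix))
    have hRHS : lessOffLoopB t tl wl m f (i+1) = t.drop (i+1) := by
      cases f with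
      | zero => rfl
      | succ f => rw [loopB_succ, if_pos hj1]
    rw [loopB_succ, if_pos hj, hRHS]
    exact List.drop_eq_getElem_cons hi
  · obtain ⟨hji, hpre, hmin⟩ := PySem.Chars.findFrom_natCast_spec tl wl i hik hj
    set jn := (PySem.Chars.findFrom tl wl (i:Int)).toNat with hjn
    have hjge : i ≤ jn := by
      have := Int.toNat_le_toNat hji
      simpa using this
    have hjgt : i + 1 ≤ jn := by
      rcases Nat.lt_or_ge i jn with h | h
      · omega
      · exfalso; have : jn = i := by omega
        rw [this] at hpre; exact hnm hpre
    have hocc1 : wl <:+: tl.drop (i+1) := infix_drop_of_prefix_drop wl tl (i+1) jn hjgt hpre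
    have hbd : jn + m ≤ t.length := by
      rcases prefix_drop_bound wl tl jn hpre with h | h
      · omega
      · exfalso
        have := hpre.length_le
        simp only [List.length_drop] at this
        omega
    have hj1 : PySem.Chars.findFrom tl wl ((i+1 : Nat) : Int) ≠ -1 := by
      rw [Ne, PySem.Chars.findFrom_natCast_eq_neg_one_iff tl wl (i+1) (by omega)]
      simpa using hocc1
    obtain ⟨hji', hpre', hmin'⟩ := PySem.Chars.findFrom_natCast_spec tl wl (i+1) (by omega) hj1
    set jn' := (PySem.Chars.findFrom tl wl ((i+1:Nat):Int)).toNat with hjn'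
    have hjge' : i + 1 ≤ jn' := by
      have hh := Int.toNat_le_toNat hji'
      rw [Int.toNat_natCast] at hh
      exact hh
    have hjeq : jn' = jn := by
      rcases Nat.lt_trichotomy jn' jn with h | h | h
      · exact absurd hpre' (hmin jn' (by omega) h)
      · exact h
      · exact absurd hpre (hmin' jn (by omega) h)
    have hjeqI : PySem.Chars.findFrom tl wl ((i+1:Nat):Int) = PySem.Chars.findFrom tl wl (i:Int) := by
      have h0 : (0:Int) ≤ PySem.Chars.findFrom tl wl (i:Int) := le_trans (by omega) hji
      have h0' : (0:Int) ≤ PySem.Chars.findFrom tl wl ((i+1:Nat):Int) := le_trans (by omega) hji'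
      rw [← Int.toNat_of_nonneg h0, ← Int.toNat_of_nonneg h0', ← hjn, ← hjn', hjeq]
    -- f ≥ 1 since jn + m ≤ len and jn ≥ i+1 give i+2 ≤ len
    obtain ⟨f', rfl⟩ : ∃ f', f = f' + 1 := ⟨f - 1, by omega⟩
    rw [loopB_succ t tl wl m (f'+1) i, if_neg hj]
    rw [loopB_succ t tl wl m f' (i+1), hjeqI, if_neg hj]
    rw [← hjn, loopB_fuel t tl wl m hm hm1 htl (f'+1) f' (jn + m) (by omega) (by omega) (by omega)]
    rw [List.drop_eq_getElem_cons hi]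
    rw [show jn - i = (jn - (i+1)) + 1 by omega]
    rw [List.take_succ_cons]
    simp

-- one B step over a matching position
theorem loopB_at_match (t tl wl : List Char) (m f : Nat) (hm : wl.length = m) (hm1 : 1 ≤ m)
    (htl : tl.length = t.length) (i : Nat) (hi : i ≤ t.length)
    (hmt : wl <+: tl.drop i) :
    lessOffLoopB t tl wl m (f+1) i
      = censorChunk ((t.drop i).take m) ++ lessOffLoopB t tl wl m f (i + m) := by
  have hik : i ≤ tl.length := by omega
  have hj : PySem.Chars.findFrom tl wl (i:Int) ≠ -1 := by
    rw [Ne, PySem.Chars.findFrom_natCast_eq_neg_one_iff tl wl i hik]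
    simpa using hmt.isInfix
  obtain ⟨hji, hpre, hmin⟩ := PySem.Chars.findFrom_natCast_spec tl wl i hik hj
  set jn := (PySem.Chars.findFrom tl wl (i:Int)).toNat with hjn
  have hjge : i ≤ jn := by
    have := Int.toNat_le_toNat hji
    simpa using this
  have hjeq : jn = i := by
    rcases Nat.lt_or_ge i jn with h | h
    · exact absurd hmt (hmin i le_rfl h)
    · omega
  simp only [lessOffLoopB, hj, if_neg, ← hjn, hjeq]
  simp

theorem main_loop (t ow : List Char) (how : ow ≠ []) :
    ∀ k i censor, i ≤ t.length → t.length - i < k →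
      lessOffLoopA t ow k i (i + ow.length) censor
        = censor ++ lessOffLoopB t (PySem.Chars.lower t) (PySem.Chars.lower ow)
            ow.length k i := by
  have hm : (PySem.Chars.lower ow).length = ow.length := length_lower ow
  have hm1 : 1 ≤ ow.length := List.length_pos_of_ne_nil how
  have htl : (PySem.Chars.lower t).length = t.length := length_lower t
  intro k
  induction k with
  | zero => intro i censor hi hk; omega
  | succ k ih =>
    intro i censor hi hk
    by_cases hin : i = t.length
    · subst hin
      rw [loopB_at_end t _ _ ow.length (k+1) (by intro h; rw [h] at hm; simp at hm; omega) htl]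
      simp [lessOffLoopA]
    · have hlt : i < t.length := lt_of_le_of_ne hi hin
      by_cases hc : PySem.Chars.lower (PySem.Chars.slice t (some (i:Int)) (some ((i + ow.length:Nat):Int)))
          = PySem.Chars.lower ow
      · -- match at i
        have hmt : PySem.Chars.lower ow <+: (PySem.Chars.lower t).drop i := (condA_iff t ow i).mp hc
        have hbound : i + ow.length ≤ t.length := by
          rcases prefix_drop_bound _ _ i hmt with h | h
          · omega
          · omega
        simp only [lessOffLoopA, if_pos hlt, if_pos hc]
        rw [sliceA_eq, hideVowel_eq]
        have harr : i + ow.length + ow.length = (i + ow.length) + ow.length := rfl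
        rw [harr, ih (i + ow.length) (censor ++ censorChunk ((t.drop i).take ow.length)) (by omega) (by omega)]
        rw [loopB_at_match t _ _ ow.length k hm hm1 htl i hi hmt]
        simp [List.append_assoc]
      · simp only [lessOffLoopA, if_pos hlt, if_neg hc]
        have hnm : ¬ PySem.Chars.lower ow <+: (PySem.Chars.lower t).drop i :=
          fun h => hc ((condA_iff t ow i).mpr h)
        have hg : (PySem.List.pyGet? t (i:Int)).elim [] (fun c => [c]) = [t[i]] := by
          rw [PySem.List.pyGet?_natCast, List.getElem?_eq_getElem hlt]
          rfl
        have harr : i + ow.length + 1 = (i+1) + ow.length := by omega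
        rw [hg, harr, ih (i+1) (censor ++ [t[i]]) (by omega) (by omega)]
        rw [loopB_step t _ _ ow.length k hm hm1 htl i hlt hnm (by omega)]
        simp [List.append_assoc]

-- ===== VERDICT (by name: the statement is the Claim_ definition above) =====
theorem less_offensive_spec : Claim_equal_less_offensive := by
  intro t oword _ hpre
  unfold Spec_less_offensive less_offensive less_offensive_alt
  have how : oword.toList ≠ [] := by
    unfold Pre_less_offensive at hpre
    simp [hpre]
  apply congrArg String.mk
  have := main_loop t.toList oword.toList how (t.toList.length + 1) 0 [] (by omega) (by omega)
  simpa using this
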